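-- pv_equiv track=rewrite | github.com/franklinvp/foobar | foobar2020/solutionProblem1.py | partitionsAndCycleCount
-- ===== SOURCE A (Python) =====
-- from collections import Counter
--
-- def factorial(x, factorialTable):
--     """
--     Read from the pre-computed table.
--     """
--     return factorialTable[x-1]
--
-- def coefficientFactor(c, n,factorialTable):
--     """
--     Computes
--
--         n!/(1^{i_1}i_1!2^{i_2}i_2!...n^{i_n}i_n!)
--
--     where c is a partition of n that has
--     i_1 1s, i_2 2s, ..., and i_n ns.
--     """
--     cc=factorial(n,factorialTable)
--     for a, b in Counter(c).items():
--         cc//=(a**b)*factorial(b,factorialTable)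
--     return cc
--
-- def partitionsAndCycleCount(n,factorialTable):
--     """
--     Iterative algorithm to generate all partitions of
--     the positive integer n.
--     In addition to each partition, we compute the following number:
--         if the partition has i_1 1s, i_2 2s, ..., i_n ns, we compute
--         n!/(1^{i_1}i_1!2^{i_2}i_2!...n^{i_n}i_n!)
--     """
--     k = 0  # Index of last element in a partition
--     p = n*[0] # To store a partition in p[0:k+1]
--     p[0] = n  # First partition is [n]
--     result = [] # To store all partitions
--     # The loop stops when the current partition has all 1s
--     while True:
--         # Add current partition to the result
--         result.append((p[0:k+1],coefficientFactor(p[0:k+1],n,factorialTable)))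
--         ## Generate next partition
--         # Find the rightmost non-one value in p[].
--         # Update rem_val so that we know how much value can be accommodated
--         rem_val = 0
--         while k >= 0 and p[k] == 1:
--             rem_val += p[k]
--             k -= 1
--         # if k < 0, all the values are 1 so there are no more partitions
--         if k < 0:
--             return result
--         # Decrease the p[k] found above and adjust the rem_val
--         p[k] -= 1
--         rem_val += 1
--         # If rem_val is more, then the sorted order is violated.  Divide
--         # rem_val in different values of size p[k] and copy these values at
--         # different positions after p[k]
--         while rem_val > p[k]:
--             p[k+1] = p[k]
--             rem_val -= p[k]
--             k += 1
--         # Copy rem_val to next position and increment position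
--         p[k+1] = rem_val
--         k += 1
-- ===== SOURCE B (Python) =====
-- def gen(m, maxpart):
--     """All partitions of m into parts <= maxpart, each non-increasing,
--     in reverse-lexicographic order."""
--     if m <= 0:
--         return [[]]
--     return genF(m, min(m, maxpart))
--
-- def genF(m, f):
--     """Partitions of m whose largest part is at most f, largest-first order."""
--     if m <= 0 or f <= 0:
--         return []
--     return [[f] + rest for rest in gen(m - f, f)] + genF(m, f - 1)
--
-- def coefficientFactor(c, n, factorialTable):
--     """n!/(1^{i_1}i_1! ... n^{i_n}i_n!) for a non-increasing partition c of n,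
--     reading factorials from factorialTable; runs of equal parts scanned directly."""
--     cc = factorialTable[n - 1]
--     rest = c
--     while rest:
--         a = rest[0]
--         b = 0
--         while rest and rest[0] == a:
--             b += 1
--             rest = rest[1:]
--         cc //= a ** b * factorialTable[b - 1]
--     return cc
--
-- def partitionsAndCycleCount(n, factorialTable):
--     return [(p, coefficientFactor(p, n, factorialTable)) for p in gen(n, n)]
-- ===== Notes on version B (the rewrite author's own statement) =====
-- stated objective: alternative
-- what changed: B replaces A's iterative in-place array successor loop (strip trailing 1s, decrement, redistribute) by a recursive enumerator gen(m, maxpart) that prepends each possible largest part, and computes each coefficient by a run-length scan of the non-increasing partition instead of building a Counter dict.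
import Mathlib
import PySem

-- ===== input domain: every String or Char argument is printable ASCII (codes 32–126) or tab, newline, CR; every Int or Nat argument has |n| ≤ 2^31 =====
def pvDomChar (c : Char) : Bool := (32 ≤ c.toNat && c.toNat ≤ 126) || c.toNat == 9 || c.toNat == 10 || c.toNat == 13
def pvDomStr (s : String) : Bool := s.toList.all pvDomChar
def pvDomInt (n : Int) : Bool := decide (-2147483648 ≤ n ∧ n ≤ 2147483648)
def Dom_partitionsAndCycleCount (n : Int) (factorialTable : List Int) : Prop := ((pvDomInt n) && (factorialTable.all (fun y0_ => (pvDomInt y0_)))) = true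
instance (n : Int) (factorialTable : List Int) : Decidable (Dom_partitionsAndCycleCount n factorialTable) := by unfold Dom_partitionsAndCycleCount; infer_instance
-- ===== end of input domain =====

-- B replaces A's in-place successor iteration over an array by a recursive enumerator of the
-- partitions (prepend each possible largest part) and a run-length scan for the coefficient;
-- same return value, different decomposition (objective: alternative).

-- ===== PORT A =====

-- factorial(x, factorialTable) = factorialTable[x-1]; on every admitted input x-1 is a valid
-- nonnegative index, so the .getD 0 default is never taken there.
def pvFactorial (x : Int) (t : List Int) : Int :=
  (PySem.List.pyGet? t (x - 1)).getD 0

-- coefficientFactor: cc = factorial(n); for a, b in Counter(c).items(): cc //= (a**b)*factorial(b).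
-- Counter values b are positive counts, so a**b is a ** b.toNat exactly.
def pvCoefficientFactor (c : List Int) (n : Int) (t : List Int) : Int :=
  (PySem.Dict.counter c).items.foldl
    (fun cc ab => PySem.Int.floordiv cc (ab.1 ^ ab.2.toNat * pvFactorial ab.2 t))
    (pvFactorial n t)

-- inner loop "while k >= 0 and p[k] == 1: rem_val += p[k]; k -= 1"
def pvStrip (p : List Int) (k rem : Int) : Int × Int :=
  if h : 0 ≤ k ∧ p.getD k.toNat 0 = 1 then
    pvStrip p (k - 1) (rem + p.getD k.toNat 0)
  else (k, rem)
termination_by (k + 1).toNat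
decreasing_by omega

-- inner loop "while rem_val > p[k]: p[k+1] = p[k]; rem_val -= p[k]; k += 1"; on every state the
-- Python loop reaches, p[k] ≥ 1, so rem_val.toNat fuel is never exhausted (fuel only makes it total).
def pvDistLoop : Nat → List Int → Int → Int → List Int × Int × Int
  | 0, p, k, rem => (p, k, rem)
  | fu + 1, p, k, rem =>
    if p.getD k.toNat 0 < rem then
      pvDistLoop fu (p.set (k + 1).toNat (p.getD k.toNat 0)) (k + 1) (rem - p.getD k.toNat 0)
    else (p, k, rem)

-- the "while True" loop; the fuel 2^n bounds the number of iterations (one per partition of n,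
-- and the number of partitions is at most 2^n, proved below as pvGen_len) — it only makes the
-- loop structurally total and is never exhausted on admitted inputs.
def pvMainLoop : Nat → List Int → Int → List (List Int × Int) → Int → List Int → List (List Int × Int)
  | 0, _, _, acc, _, _ => acc
  | fu + 1, p, k, acc, n, t =>
    let part := PySem.List.slice p (some 0) (some (k + 1))
    let acc2 := acc ++ [(part, pvCoefficientFactor part n t)]
    let sr := pvStrip p k 0
    if sr.1 < 0 then acc2
    else
      let p1 := p.set sr.1.toNat (p.getD sr.1.toNat 0 - 1)
      let rem1 := sr.2 + 1
      let dr := pvDistLoop rem1.toNat p1 sr.1 rem1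
      let p2 := dr.1.set (dr.2.1 + 1).toNat dr.2.2
      pvMainLoop fu p2 (dr.2.1 + 1) acc2 n t

def partitionsAndCycleCount (n : Int) (factorialTable : List Int) : List (List Int × Int) :=
  pvMainLoop (2 ^ n.toNat) ((List.replicate n.toNat 0).set 0 n) 0 [] n factorialTable

-- ===== PORT B =====

mutual
-- gen(m, maxpart): all partitions of m into parts ≤ maxpart, reverse-lexicographic order
def pvGen (m maxpart : Int) : List (List Int) :=
  if m ≤ 0 then [[]] else pvGenF m (min m maxpart)
termination_by (m.toNat, 1, 0)
decreasing_by apply Prod.Lex.right; apply Prod.Lex.left; omega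

-- genF(m, f): partitions of m with largest part ≤ f, largest-first
def pvGenF (m f : Int) : List (List Int) :=
  if m ≤ 0 ∨ f ≤ 0 then []
  else (pvGen (m - f) f).map (f :: ·) ++ pvGenF m (f - 1)
termination_by (m.toNat, 0, f.toNat)
decreasing_by
  · apply Prod.Lex.left; omega
  · apply Prod.Lex.right; apply Prod.Lex.right; omega
end

-- inner loop "while rest and rest[0] == a: b += 1; rest = rest[1:]"
def pvRun (a : Int) (b : Int) : List Int → Int × List Int
  | [] => (b, [])
  | x :: xs => if x == a then pvRun a (b + 1) xs else (b, x :: xs)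

lemma pvRun_len (a : Int) : ∀ (b : Int) (l : List Int), (pvRun a b l).2.length ≤ l.length := by
  intro b l
  induction l generalizing b with
  | nil => simp [pvRun]
  | cons x xs ih =>
    by_cases h : x == a
    · simpa [pvRun, h] using Nat.le_succ_of_le (ih (b + 1))
    · simp [pvRun, h]

-- the outer "while rest:" loop of coefficientFactor in Source B
def pvCoeffLoop (t : List Int) (cc : Int) : List Int → Int
  | [] => cc
  | x :: xs =>
    let br := pvRun x 0 (x :: xs)
    pvCoeffLoop t
      (PySem.Int.floordiv cc (x ^ br.1.toNat * (PySem.List.pyGet? t (br.1 - 1)).getD 0))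
      br.2
termination_by l => l.length
decreasing_by
  have h := pvRun_len x 1 xs
  simp only [pvRun, BEq.rfl, if_true]
  simpa using Nat.lt_succ_of_le h

def pvCoefficientFactorB (c : List Int) (n : Int) (t : List Int) : Int :=
  pvCoeffLoop t ((PySem.List.pyGet? t (n - 1)).getD 0) c

def partitionsAndCycleCount_alt (n : Int) (factorialTable : List Int) : List (List Int × Int) :=
  (pvGen n n).map (fun p => (p, pvCoefficientFactorB p n factorialTable))

-- ===== PRECONDITION & SPEC =====

-- Exactly the inputs on which the Python A returns: n ≥ 1 (otherwise p[0] = n raises IndexError),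
-- a factorial table of length ≥ n (factorial reads indices up to n-1), and no zero among the table
-- entries actually used as divisors: those are the entries at indices b-1 for b a multiplicity of
-- some partition of n, i.e. every index below n except n-2 when n ≥ 3 (a zero there raises
-- ZeroDivisionError in cc //= ...).
def Pre_partitionsAndCycleCount (n : Int) (factorialTable : List Int) : Prop :=
  1 ≤ n ∧ n ≤ factorialTable.length ∧
    ∀ i : Nat, i < n.toNat → factorialTable.getD i 0 = 0 → 3 ≤ n ∧ (i : Int) = n - 2
instance (n : Int) (factorialTable : List Int) : Decidable (Pre_partitionsAndCycleCount n factorialTable) := by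
  unfold Pre_partitionsAndCycleCount; infer_instance

def pvWitness_partitionsAndCycleCount : Int × List Int := (3, [1, 2, 6])

def Spec_partitionsAndCycleCount (n : Int) (factorialTable : List Int) (out : List (List Int × Int)) : Prop := out = partitionsAndCycleCount_alt n factorialTable
instance (n : Int) (factorialTable : List Int) (out : List (List Int × Int)) : Decidable (Spec_partitionsAndCycleCount n factorialTable out) := by unfold Spec_partitionsAndCycleCount; infer_instance

-- ===== CLAIM (what is proved, stated in full; the proofs are below) =====
def Claim_equal_partitionsAndCycleCount : Prop := ∀ (n : Int) (factorialTable : List Int), Dom_partitionsAndCycleCount n factorialTable → Pre_partitionsAndCycleCount n factorialTable → Spec_partitionsAndCycleCount n factorialTable (partitionsAndCycleCount n factorialTable)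

-- ===== LEMMAS AND PROOFS =====

-- Abstract description of A's successor step on the partition itself (p[0:k+1]) rather than on
-- the (p, k) array state; the proofs relate both ports to it.

-- the distribution "while rem > v: emit v; rem -= v; then emit rem", fuel-totalized
def pvADist (v : Int) : Nat → Int → List Int
  | 0, rem => [rem]
  | fu + 1, rem => if v < rem then v :: pvADist v fu (rem - v) else [rem]

def pvDist (v rem : Int) : List Int := pvADist v rem.toNat rem

-- A's successor: strip trailing 1s, decrement the part found, redistribute
def pvSucc (q : List Int) : Option (List Int) :=
  match q.reverse.dropWhile (· == 1), (q.reverse.takeWhile (· == 1)).length with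
  | [], _ => none
  | v :: t, c => some (t.reverse ++ (v - 1) :: pvDist (v - 1) ((c : Int) + 1))

def pvChainRun : Nat → List Int → List (List Int)
  | 0, _ => []
  | fu + 1, q => q :: (match pvSucc q with
    | none => []
    | some q' => pvChainRun fu q')

lemma pvADist_irrel (v : Int) (hv : 1 ≤ v) : ∀ (fu1 fu2 : Nat) (rem : Int),
    rem.toNat ≤ fu1 → rem.toNat ≤ fu2 → pvADist v fu1 rem = pvADist v fu2 rem := by
  intro fu1
  induction fu1 with
  | zero =>
    intro fu2 rem h1 _
    have hr : ¬ v < rem := by omega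
    cases fu2 with
    | zero => rfl
    | succ fu2 => simp [pvADist, hr]
  | succ fu1 ih =>
    intro fu2 rem h1 h2
    cases fu2 with
    | zero =>
      have hr : ¬ v < rem := by omega
      simp [pvADist, hr]
    | succ fu2 =>
      by_cases hvr : v < rem
      · simp only [pvADist, if_pos hvr]
        rw [ih fu2 (rem - v) (by omega) (by omega)]
      · simp [pvADist, hvr]

lemma pvADist_fuel (v : Int) (hv : 1 ≤ v) :
    ∀ fu (rem : Int), rem.toNat ≤ fu → pvADist v fu rem = pvDist v rem := by
  intro fu rem h
  exact pvADist_irrel v hv fu rem.toNat rem h le_rfl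

lemma pvDist_eq (v rem : Int) (hv : 1 ≤ v) (hr : 1 ≤ rem) :
    pvDist v rem = if v < rem then v :: pvDist v (rem - v) else [rem] := by
  have hk : rem.toNat = (rem.toNat - 1) + 1 := by omega
  unfold pvDist
  rw [hk]
  simp only [pvADist]
  by_cases hvr : v < rem
  · rw [if_pos hvr, if_pos hvr, pvADist_fuel v hv _ _ (by omega)]
    rfl
  · rw [if_neg hvr, if_neg hvr]

lemma pvDist_ne_nil (v rem : Int) : pvDist v rem ≠ [] := by
  unfold pvDist
  cases h : rem.toNat with
  | zero => simp [pvADist]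
  | succ k =>
    simp only [pvADist]
    split <;> simp

lemma pvDist_sum (v : Int) (hv : 1 ≤ v) :
    ∀ (rem : Int), 1 ≤ rem → (pvDist v rem).sum = rem := by
  have main : ∀ (N : Nat) (rem : Int), rem.toNat ≤ N → 1 ≤ rem → (pvDist v rem).sum = rem := by
    intro N
    induction N with
    | zero => intro rem h hr; omega
    | succ N ih =>
      intro rem h hr
      rw [pvDist_eq v rem hv hr]
      by_cases hvr : v < rem
      · rw [if_pos hvr]
        simp only [List.sum_cons, ih (rem - v) (by omega) (by omega)]
        ring
      · rw [if_neg hvr]; simp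
  exact fun rem hr => main rem.toNat rem le_rfl hr

lemma pvDist_pos (v : Int) (hv : 1 ≤ v) :
    ∀ (rem : Int), 1 ≤ rem → ∀ x ∈ pvDist v rem, 1 ≤ x := by
  have main : ∀ (N : Nat) (rem : Int), rem.toNat ≤ N → 1 ≤ rem → ∀ x ∈ pvDist v rem, 1 ≤ x := by
    intro N
    induction N with
    | zero => intro rem h hr; omega
    | succ N ih =>
      intro rem h hr x hx
      rw [pvDist_eq v rem hv hr] at hx
      by_cases hvr : v < rem
      · rw [if_pos hvr] at hx
        rcases List.mem_cons.mp hx with rfl | hx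
        · exact hv
        · exact ih (rem - v) (by omega) (by omega) x hx
      · rw [if_neg hvr] at hx
        simp at hx; omega
  exact fun rem hr => main rem.toNat rem le_rfl hr

lemma pvDist_min (v rem : Int) (hv : 1 ≤ v) (hr : 1 ≤ rem) :
    pvDist (min rem v) rem = pvDist v rem := by
  by_cases h : rem ≤ v
  · rw [min_eq_left h, pvDist_eq rem rem hr hr, pvDist_eq v rem hv hr,
      if_neg (by omega), if_neg (by omega)]
  · rw [min_eq_right (by omega)]

lemma pvLen_le_sum (l : List Int) (h : ∀ x ∈ l, 1 ≤ x) : (l.length : Int) ≤ l.sum := by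
  induction l with
  | nil => simp
  | cons x xs ih =>
    have hx := h x (List.mem_cons_self)
    have := ih (fun y hy => h y (List.mem_cons_of_mem _ hy))
    simp only [List.length_cons, List.sum_cons]
    push_cast
    omega

-- ===== strip-loop characterisation =====

lemma pvStrip_spec : ∀ (c : Nat) (s junk : List Int) (r0 : Int),
    (s = [] ∨ s.getLast? ≠ some 1) →
    pvStrip (s ++ List.replicate c 1 ++ junk) (((s.length : Int) + c) - 1) r0
      = ((s.length : Int) - 1, r0 + c) := by
  intro c
  induction c with
  | zero =>
    intro s junk r0 hs
    have hp : s ++ List.replicate 0 (1 : Int) ++ junk = s ++ junk := by simp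
    rw [hp]
    simp only [Nat.cast_zero, add_zero]
    by_cases hsnil : s = []
    · subst hsnil
      have hneg : ¬((0:Int) ≤ ((([]:List Int)).length : Int) - 1
          ∧ (([]:List Int) ++ junk).getD (((([]:List Int)).length : Int) - 1).toNat 0 = 1) := by
        simp
      rw [pvStrip, dif_neg hneg]
    · rcases hs with hs0 | hs
      · exact absurd hs0 hsnil
      have hne : s ≠ [] := hsnil
      have hlt : s.length - 1 < s.length := by
        cases s with
        | nil => exact absurd rfl hne
        | cons a l => simp
      have hval : (s ++ junk).getD ((s.length : Int) - 1).toNat 0 ≠ 1 := by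
        have ht : ((s.length : Int) - 1).toNat = s.length - 1 := by omega
        rw [ht, List.getD_append _ _ _ _ hlt, List.getD_eq_getElem?_getD]
        have := List.getLast?_eq_getElem? (l := s)
        rw [← this]
        cases h : s.getLast? with
        | none => simp [List.getLast?_eq_none_iff] at h; exact absurd h hne
        | some v =>
          rw [h] at hs
          simp only [Option.getD_some]
          intro hv; rw [hv] at hs; exact hs rfl
      rw [pvStrip, dif_neg (by rintro ⟨_, h⟩; exact hval h)]
  | succ c ih =>
    intro s junk r0 hs
    have hp : s ++ List.replicate (c + 1) 1 ++ junk
        = (s ++ List.replicate c 1) ++ ((1 : Int) :: junk) := by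
      rw [List.replicate_succ']
      simp [List.append_assoc]
    have hK : (((s.length : Int) + (c + 1 : Nat)) - 1).toNat = (s ++ List.replicate c 1).length := by
      simp only [List.length_append, List.length_replicate]
      push_cast
      omega
    have hval : ((s ++ List.replicate c 1) ++ ((1 : Int) :: junk)).getD
        (((s.length : Int) + (c + 1 : Nat)) - 1).toNat 0 = 1 := by
      rw [hK, List.getD_append_right _ _ _ _ le_rfl]
      simp
    rw [hp, pvStrip, dif_pos ⟨by push_cast; omega, hval⟩, hval]
    have hq : (s ++ List.replicate c 1) ++ ((1 : Int) :: junk)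
        = s ++ List.replicate c 1 ++ ((1 : Int) :: junk) := by
      simp [List.append_assoc]
    have hk2 : (((s.length : Int) + (c + 1 : Nat)) - 1) - 1 = ((s.length : Int) + (c : Nat)) - 1 := by
      push_cast; ring
    rw [hq, hk2, ih s ((1 : Int) :: junk) (r0 + 1) hs]
    simp only [Prod.mk.injEq, true_and]
    push_cast
    ring

-- ===== distribute-loop characterisation =====

lemma pvDistLoop_spec (w : Int) (hw : 1 ≤ w) :
    ∀ (fu : Nat) (rem : Int) (pre junk : List Int),
    1 ≤ rem → rem.toNat ≤ fu → (pvDist w rem).length ≤ junk.length + 1 →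
    pvDistLoop fu (pre ++ w :: junk) (pre.length : Int) rem
      = (pre ++ w :: ((pvDist w rem).dropLast ++ junk.drop ((pvDist w rem).length - 1)),
         (pre.length : Int) + (((pvDist w rem).length - 1 : Nat) : Int),
         (pvDist w rem).getLastD 0) := by
  intro fu
  induction fu with
  | zero => intro rem pre junk hr hfu _; omega
  | succ fu ih =>
    intro rem pre junk hr hfu hroom
    have hget : (pre ++ w :: junk).getD ((pre.length : Int)).toNat 0 = w := by
      have : ((pre.length : Int)).toNat = pre.length := by omega
      rw [this, List.getD_append_right _ _ _ _ le_rfl]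
      simp
    rw [pvDistLoop, hget]
    by_cases hvr : w < rem
    · rw [if_pos hvr]
      have hD := pvDist_eq w rem hw hr
      rw [if_pos hvr] at hD
      have hD' := pvDist_ne_nil w (rem - w)
      have hjunk : junk ≠ [] := by
        intro h
        rw [hD, h] at hroom
        simp only [List.length_nil, List.length_cons] at hroom
        have := List.length_pos_of_ne_nil hD'
        omega
      obtain ⟨j, junk', rfl⟩ := List.exists_cons_of_ne_nil hjunk
      have hset : (pre ++ w :: j :: junk').set ((pre.length : Int) + 1).toNat w
          = (pre ++ [w]) ++ w :: junk' := by
        have ht : ((pre.length : Int) + 1).toNat = pre.length + 1 := by omega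
        rw [ht]
        rw [List.set_append_right _ _ (by omega)]
        simp [List.set_cons_succ, List.set_cons_zero, List.append_assoc]
      rw [hset]
      have hlen1 : ((pre ++ [w]).length : Int) = (pre.length : Int) + 1 := by simp
      rw [← hlen1]
      rw [ih (rem - w) (pre ++ [w]) junk' (by omega) (by omega)
        (by rw [hD] at hroom; simp only [List.length_cons] at hroom; omega)]
      rw [hD]
      have hdl : ((w :: pvDist w (rem - w)).dropLast) = w :: (pvDist w (rem - w)).dropLast :=
        List.dropLast_cons_of_ne_nil hD'
      have hlenD := List.length_pos_of_ne_nil hD'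
      simp only [Prod.mk.injEq]
      refine ⟨?_, ?_, ?_⟩
      · have hdrop : List.drop (pvDist w (rem - w)).length ((j : Int) :: junk')
            = List.drop ((pvDist w (rem - w)).length - 1) junk' := by
          conv_lhs => rw [show (pvDist w (rem - w)).length
            = ((pvDist w (rem - w)).length - 1) + 1 from by omega]
          rw [List.drop_succ_cons]
        simp only [hdl, List.length_cons, Nat.add_sub_cancel]
        simp [hdrop, List.append_assoc]
      · simp only [hdl, List.length_cons, List.length_append, List.length_nil, Nat.add_sub_cancel]
        omega
      · rw [List.getLastD_cons, List.getLastD_eq_getLast?, List.getLastD_eq_getLast?,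
          List.getLast?_eq_some_getLast hD', Option.getD_some, Option.getD_some]
    · rw [if_neg hvr]
      have hD := pvDist_eq w rem hw hr
      rw [if_neg hvr] at hD
      simp [hD]

-- ===== main-loop simulation =====

lemma pvGetLastD_concat (l : List Int) (h : l ≠ []) : l.dropLast ++ [l.getLastD 0] = l := by
  rw [List.getLastD_eq_getLast?, List.getLast?_eq_some_getLast h, Option.getD_some,
    List.dropLast_append_getLast]

-- every list splits as (non-1-ended prefix) ++ (trailing 1s), read off via reverse
lemma pvDecomp (q : List Int) :
    q = (q.reverse.dropWhile (· == 1)).reverse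
        ++ List.replicate (q.reverse.takeWhile (· == 1)).length 1
      ∧ ((q.reverse.dropWhile (· == 1)).reverse = []
         ∨ ((q.reverse.dropWhile (· == 1)).reverse).getLast? ≠ some 1) := by
  constructor
  · have h1 : q.reverse.takeWhile (· == 1) ++ q.reverse.dropWhile (· == 1) = q.reverse :=
      List.takeWhile_append_dropWhile
    have h2 : q.reverse.takeWhile (· == 1)
        = List.replicate (q.reverse.takeWhile (· == 1)).length 1 := by
      apply List.eq_replicate_of_mem
      intro b hb
      have := List.mem_takeWhile_imp hb
      simpa using this
    calc q = q.reverse.reverse := (List.reverse_reverse q).symm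
      _ = (q.reverse.takeWhile (· == 1) ++ q.reverse.dropWhile (· == 1)).reverse := by rw [h1]
      _ = (q.reverse.dropWhile (· == 1)).reverse ++ (q.reverse.takeWhile (· == 1)).reverse := by
          rw [List.reverse_append]
      _ = _ := by rw [h2, List.reverse_replicate]; simp
  · cases hd : q.reverse.dropWhile (· == 1) with
    | nil => left; simp
    | cons v t =>
      right
      have hv : ¬ ((v == 1) = true) := by
        have h0 : 0 < (q.reverse.dropWhile (· == 1)).length := by rw [hd]; simp
        have := List.dropWhile_get_zero_not (p := (· == 1)) q.reverse h0
        simpa [hd] using this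
      rw [List.getLast?_reverse]
      simp only [List.head?_cons]
      intro hc
      apply hv
      rw [Option.some_inj] at hc
      simp [hc]

def pvValid (n : Int) (q junk : List Int) : Prop :=
  q ≠ [] ∧ (∀ x ∈ q, 1 ≤ x) ∧ q.sum = n ∧ q.length + junk.length = n.toNat

lemma pvMainLoop_spec (n : Int) (t : List Int) :
    ∀ (fu : Nat) (q junk : List Int) (acc : List (List Int × Int)), pvValid n q junk →
    pvMainLoop fu (q ++ junk) ((q.length : Int) - 1) acc n t
      = acc ++ (pvChainRun fu q).map (fun p => (p, pvCoefficientFactor p n t)) := by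
  intro fu
  induction fu with
  | zero => intro q junk acc _; simp [pvMainLoop, pvChainRun]
  | succ fu ih =>
    intro q junk acc hval
    obtain ⟨hqnil, hpos, hsum, hlen⟩ := hval
    have hq1 : 1 ≤ q.length := List.length_pos_of_ne_nil hqnil
    -- the partition slice is q itself
    have hslice : PySem.List.slice (q ++ junk) (some 0) (some ((q.length : Int) - 1 + 1)) = q := by
      have hb : (q.length : Int) - 1 + 1 = ((q.length : Nat) : Int) := by ring
      rw [hb]
      simp [pysem]
    set s := (q.reverse.dropWhile (· == 1)).reverse with hs_def
    set c := (q.reverse.takeWhile (· == 1)).length with hc_def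
    obtain ⟨hdec, hlast1⟩ := pvDecomp q
    rw [← hs_def, ← hc_def] at hdec
    rw [← hs_def] at hlast1
    have hqlen : q.length = s.length + c := by
      conv_lhs => rw [hdec]
      simp
    have hstrip : pvStrip (q ++ junk) ((q.length : Int) - 1) 0 = ((s.length : Int) - 1, (c : Int)) := by
      have hplist : q ++ junk = s ++ List.replicate c 1 ++ junk := by rw [← hdec]
      have hk : (q.length : Int) - 1 = ((s.length : Int) + c) - 1 := by
        rw [hqlen]; push_cast; ring
      rw [hplist, hk, pvStrip_spec c s junk 0 hlast1]
      simp
    rw [pvMainLoop]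
    simp only [hslice, hstrip]
    by_cases hsnil : s = []
    · -- all parts are 1: the loop returns; the successor is none
      have hsucc : pvSucc q = none := by
        unfold pvSucc
        have hnil : q.reverse.dropWhile (· == 1) = [] := by
          have h1 := hs_def
          rw [hsnil] at h1
          simpa using h1.symm
        rw [hnil]
      rw [if_pos (by rw [hsnil]; simp)]
      rw [pvChainRun, hsucc]
      simp
    · -- decrement the last non-1 part and redistribute
      have hslen1 : 1 ≤ s.length := List.length_pos_of_ne_nil hsnil
      rw [if_neg (by push_cast; omega)]
      set v := s.getLast hsnil with hv_def
      have hsplit : s = s.dropLast ++ [v] := (List.dropLast_append_getLast hsnil).symm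
      have hvq : v ∈ q := by
        rw [hdec]
        exact List.mem_append_left _ (List.getLast_mem hsnil)
      have hvpos : 1 ≤ v := hpos v hvq
      have hvne1 : v ≠ 1 := by
        rcases hlast1 with h | h
        · exact absurd h hsnil
        · intro hc
          apply h
          rw [List.getLast?_eq_some_getLast hsnil, ← hv_def, hc]
      have hv2 : 2 ≤ v := by omega
      set w := v - 1 with hw_def
      have hwpos : 1 ≤ w := by omega
      set rem1 := (c : Int) + 1 with hrem1_def
      have hrem1pos : 1 ≤ rem1 := by omega
      set D := pvDist w rem1 with hD_def
      have hDnil : D ≠ [] := pvDist_ne_nil w rem1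
      have hDlen1 : 1 ≤ D.length := List.length_pos_of_ne_nil hDnil
      have hDsum : D.sum = rem1 := pvDist_sum w hwpos rem1 hrem1pos
      have hDpos : ∀ x ∈ D, 1 ≤ x := pvDist_pos w hwpos rem1 hrem1pos
      have hDlen : (D.length : Int) ≤ rem1 := by
        calc (D.length : Int) ≤ D.sum := pvLen_le_sum D hDpos
        _ = rem1 := hDsum
      -- the new partition
      set q' := s.dropLast ++ w :: D with hq'_def
      have hq'pos : ∀ x ∈ q', 1 ≤ x := by
        intro x hx
        rcases List.mem_append.mp hx with hx | hx
        · apply hpos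
          rw [hdec]
          exact List.mem_append_left _ (List.mem_of_mem_dropLast hx)
        · rcases List.mem_cons.mp hx with rfl | hx
          · exact hwpos
          · exact hDpos x hx
      have hq'sum : q'.sum = n := by
        have h1 : q.sum = s.dropLast.sum + v + c := by
          conv_lhs => rw [hdec, hsplit]
          simp [List.sum_append]
          ring
        rw [hq'_def]
        simp only [List.sum_append, List.sum_cons, hDsum]
        omega
      have hq'len_le : q'.length ≤ n.toNat := by
        have h1 : (q'.length : Int) ≤ q'.sum := pvLen_le_sum q' hq'pos
        rw [hq'sum] at h1
        omega
      have hq'len : q'.length = s.length + D.length := by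
        rw [hq'_def]
        conv_rhs => rw [hsplit]
        simp only [List.length_append, List.length_cons, List.length_dropLast, List.length_nil]
        omega
      have hDroom : D.length ≤ c + junk.length := by
        have : q.length + junk.length = n.toNat := hlen
        have h2 : s.length + D.length ≤ n.toNat := by rw [← hq'len]; exact hq'len_le
        omega
      -- the set p[k] -= 1
      have hset1 : (q ++ junk).set ((s.length : Int) - 1).toNat ((q ++ junk).getD ((s.length : Int) - 1).toNat 0 - 1)
          = s.dropLast ++ w :: (List.replicate c 1 ++ junk) := by
        have hidx : ((s.length : Int) - 1).toNat = s.dropLast.length := by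
          simp only [List.length_dropLast]; omega
        have hplist : q ++ junk = s.dropLast ++ v :: (List.replicate c 1 ++ junk) := by
          conv_lhs => rw [hdec, hsplit]
          simp [List.append_assoc]
        rw [hplist, hidx]
        rw [List.getD_append_right _ _ _ _ le_rfl, List.set_append_right _ _ le_rfl]
        simp [hw_def]
      rw [hset1]
      -- the distribution loop
      have hpre : ((s.length : Int) - 1) = (s.dropLast.length : Int) := by
        simp only [List.length_dropLast]; omega
      have hdist := pvDistLoop_spec w hwpos rem1.toNat rem1 s.dropLast
        (List.replicate c 1 ++ junk) hrem1pos le_rfl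
        (by rw [← hD_def]
            simp only [List.length_append, List.length_replicate]
            omega)
      rw [hpre, hdist]
      -- the final write p[k+1] = rem
      have hrest_len : ((List.replicate c (1:Int) ++ junk).drop (D.length - 1)).length
          = c + junk.length - (D.length - 1) := by
        simp [List.length_drop]
      have hrest_ne : (List.replicate c (1:Int) ++ junk).drop (D.length - 1) ≠ [] := by
        intro h
        rw [← List.length_eq_zero_iff] at h
        omega
      obtain ⟨r0, rest, hrest⟩ := List.exists_cons_of_ne_nil hrest_ne
      have hrest_tail : rest = (List.replicate c (1:Int) ++ junk).drop D.length := by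
        have h1 : D.length = (D.length - 1) + 1 := by omega
        have h2 : (List.replicate c (1:Int) ++ junk).drop D.length
            = ((List.replicate c (1:Int) ++ junk).drop (D.length - 1)).drop 1 := by
          rw [List.drop_drop]
          congr 1 <;> omega
        rw [h2, hrest]
        simp
      have hset2 : (s.dropLast ++ w :: (D.dropLast ++ (List.replicate c 1 ++ junk).drop (D.length - 1))).set
            (((s.dropLast.length : Int) + ((D.length - 1 : Nat) : Int) + 1)).toNat (D.getLastD 0)
          = q' ++ rest := by
        have hidx : (((s.dropLast.length : Int) + ((D.length - 1 : Nat) : Int) + 1)).toNat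
            = (s.dropLast ++ w :: D.dropLast).length := by
          simp only [List.length_append, List.length_cons, List.length_dropLast]
          omega
        have hplist : s.dropLast ++ w :: (D.dropLast ++ (List.replicate c 1 ++ junk).drop (D.length - 1))
            = (s.dropLast ++ w :: D.dropLast) ++ (r0 :: rest) := by
          rw [hrest]
          simp [List.append_assoc]
        rw [hplist, hidx, List.set_append_right _ _ le_rfl]
        simp only [Nat.sub_self, List.set_cons_zero]
        rw [hq'_def]
        conv_rhs => rw [← pvGetLastD_concat D hDnil]
        simp [List.append_assoc]
      rw [hset2]
      -- the successor equation
      have hsucc : pvSucc q = some q' := by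
        unfold pvSucc
        have hdw : q.reverse.dropWhile (· == 1) = v :: s.dropLast.reverse := by
          have h1 : q.reverse.dropWhile (· == 1) = s.reverse := by
            rw [hs_def, List.reverse_reverse]
          rw [h1]
          conv_lhs => rw [hsplit]
          simp
        rw [hdw]
        simp only [← hc_def, List.reverse_reverse]
        rfl
      -- reassemble
      have hk' : (s.dropLast.length : Int) + ((D.length - 1 : Nat) : Int) + 1
          = ((q'.length : Int)) - 1 := by
        rw [hq'len]
        simp only [List.length_dropLast]
        omega
      rw [hk']
      have hval' : pvValid n q' rest := by
        refine ⟨by simp [hq'_def], hq'pos, hq'sum, ?_⟩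
        have h1 : rest.length = c + junk.length - D.length := by
          rw [hrest_tail]
          simp [List.length_drop]
        rw [hq'len, h1]
        omega
      rw [ih q' rest (acc ++ [(q, pvCoefficientFactor q n t)]) hval']
      rw [pvChainRun, hsucc]
      simp

-- ===== B-side: structure of the generated partitions =====

lemma pvGenF_eq_nil (m f : Int) (h : m ≤ 0 ∨ f ≤ 0) : pvGenF m f = [] := by
  rw [pvGenF, if_pos h]

lemma pvGenF_eq (m f : Int) (h : ¬ (m ≤ 0 ∨ f ≤ 0)) :
    pvGenF m f = (pvGen (m - f) f).map (f :: ·) ++ pvGenF m (f - 1) := by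
  rw [pvGenF, if_neg h]

lemma pvGen_eq_nil (m mx : Int) (h : m ≤ 0) : pvGen m mx = [[]] := by
  rw [pvGen, if_pos h]

lemma pvGen_eq (m mx : Int) (h : ¬ m ≤ 0) : pvGen m mx = pvGenF m (min m mx) := by
  rw [pvGen, if_neg h]

lemma pvTakeWhile_ones (k : Nat) (l : List Int) :
    (List.replicate k (1 : Int) ++ l).takeWhile (· == 1)
      = List.replicate k (1 : Int) ++ l.takeWhile (· == 1) := by
  induction k with
  | zero => simp
  | succ k ih => simp [List.replicate_succ, List.takeWhile_cons, ih]

lemma pvDropWhile_ones (k : Nat) (l : List Int) :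
    (List.replicate k (1 : Int) ++ l).dropWhile (· == 1) = l.dropWhile (· == 1) := by
  induction k with
  | zero => simp
  | succ k ih => simp [List.replicate_succ, List.dropWhile_cons, ih]

lemma pvGenF_props : ∀ (M F : Nat) (m f : Int), m.toNat ≤ M → f.toNat ≤ F → 1 ≤ m → f ≤ m →
    ∀ q ∈ pvGenF m f, q.sum = m ∧ (∀ x ∈ q, 1 ≤ x ∧ x ≤ f) ∧ q.Pairwise (fun a b => b ≤ a) := by
  intro M
  induction M using Nat.strong_induction_on with
  | _ M ihM =>
  intro F
  induction F with
  | zero =>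
    intro m f hm hf hm1 hfm q hq
    rw [pvGenF_eq_nil m f (by omega)] at hq
    simp at hq
  | succ F ihF =>
    intro m f hm hf hm1 hfm q hq
    by_cases hf0 : f ≤ 0
    · rw [pvGenF_eq_nil m f (Or.inr hf0)] at hq
      simp at hq
    · rw [pvGenF_eq m f (by omega)] at hq
      rcases List.mem_append.mp hq with hq | hq
      · obtain ⟨r, hr, rfl⟩ := List.mem_map.mp hq
        by_cases hmf : m - f ≤ 0
        · rw [pvGen_eq_nil _ _ hmf] at hr
          simp only [List.mem_singleton] at hr
          subst hr
          have hfe : f = m := by omega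
          refine ⟨by simp [hfe], ?_, by simp⟩
          intro x hx
          simp only [List.mem_singleton] at hx
          subst hx
          omega
        · rw [pvGen_eq _ _ hmf] at hr
          have hprops := ihM (m.toNat - 1) (by omega) ((min (m - f) f).toNat) (m - f)
            (min (m - f) f) (by omega) le_rfl (by omega) (min_le_left _ _) r hr
          obtain ⟨hsum, hbnd, hpw⟩ := hprops
          refine ⟨?_, ?_, ?_⟩
          · simp only [List.sum_cons, hsum]; ring
          · intro x hx
            rcases List.mem_cons.mp hx with rfl | hx
            · omega
            · have := hbnd x hx
              have h2 : min (m - f) f ≤ f := min_le_right _ _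
              omega
          · rw [List.pairwise_cons]
            refine ⟨?_, hpw⟩
            intro x hx
            have := hbnd x hx
            have h2 : min (m - f) f ≤ f := min_le_right _ _
            omega
      · have := ihF m (f - 1) hm (by omega) hm1 (by omega) q hq
        obtain ⟨hsum, hbnd, hpw⟩ := this
        refine ⟨hsum, ?_, hpw⟩
        intro x hx
        have := hbnd x hx
        omega

lemma pvGen_props (m mx : Int) (hm : 0 ≤ m) :
    ∀ q ∈ pvGen m mx, q.sum = m ∧ (∀ x ∈ q, 1 ≤ x ∧ x ≤ mx) ∧ q.Pairwise (fun a b => b ≤ a) := by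
  intro q hq
  by_cases h0 : m ≤ 0
  · rw [pvGen_eq_nil _ _ h0] at hq
    simp only [List.mem_singleton] at hq
    subst hq
    refine ⟨by simp; omega, by simp, by simp⟩
  · rw [pvGen_eq _ _ h0] at hq
    have := pvGenF_props m.toNat ((min m mx).toNat) m (min m mx) le_rfl le_rfl (by omega)
      (min_le_left _ _) q hq
    obtain ⟨hsum, hbnd, hpw⟩ := this
    refine ⟨hsum, ?_, hpw⟩
    intro x hx
    have := hbnd x hx
    have h2 : min m mx ≤ mx := min_le_right _ _
    omega

lemma pvSucc_lift (f : Int) (r r' : List Int) (h : pvSucc r = some r') :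
    pvSucc (f :: r) = some (f :: r') := by
  unfold pvSucc at h ⊢
  cases hdw : r.reverse.dropWhile (· == 1) with
  | nil => rw [hdw] at h; exact absurd h (by simp)
  | cons v tl =>
    rw [hdw] at h
    simp only [Option.some_inj] at h
    have hne : ¬ ((r.reverse.takeWhile (· == 1)).length = r.reverse.length) := by
      have h1 : r.reverse.takeWhile (· == 1) ++ r.reverse.dropWhile (· == 1) = r.reverse :=
        List.takeWhile_append_dropWhile
      have h2 := congrArg List.length h1
      rw [List.length_append, hdw] at h2
      simp at h2
      rw [List.length_reverse]
      omega
    have hrev : (f :: r).reverse = r.reverse ++ [f] := by simp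
    have hdw2 : (f :: r).reverse.dropWhile (· == 1) = (v :: tl) ++ [f] := by
      rw [hrev, List.dropWhile_append, hdw]
      simp
    have htw2 : (f :: r).reverse.takeWhile (· == 1) = r.reverse.takeWhile (· == 1) := by
      rw [hrev, List.takeWhile_append, if_neg hne]
    rw [hdw2, htw2]
    simp only [List.cons_append, Option.some_inj]
    rw [← h]
    simp

lemma pvSucc_block (f m : Int) (hf2 : 2 ≤ f) (hfm : f ≤ m) :
    pvSucc (f :: List.replicate (m - f).toNat 1) = some (pvDist (f - 1) m) := by
  unfold pvSucc
  have hf1 : ((f == 1) = false) := by simp; omega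
  have hrev : (f :: List.replicate (m - f).toNat 1).reverse
      = List.replicate (m - f).toNat 1 ++ [f] := by
    simp [List.reverse_replicate]
  have hdw : (f :: List.replicate (m - f).toNat 1).reverse.dropWhile (· == 1) = [f] := by
    rw [hrev, pvDropWhile_ones]
    simp [List.dropWhile_cons, hf1]
  have htw : ((f :: List.replicate (m - f).toNat 1).reverse.takeWhile (· == 1)).length
      = (m - f).toNat := by
    rw [hrev, pvTakeWhile_ones]
    simp [List.takeWhile_cons, hf1]
  rw [hdw, htw]
  simp only [List.reverse_nil, List.nil_append, Option.some_inj]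
  rw [pvDist_eq (f - 1) m (by omega) (by omega), if_pos (by omega)]
  congr 2
  omega

lemma pvGenF_chain : ∀ (M F : Nat) (m f : Int), m.toNat ≤ M → f.toNat ≤ F → 1 ≤ f → f ≤ m →
    List.IsChain (fun a b => pvSucc a = some b) (pvGenF m f) ∧
    (pvGenF m f).head? = some (pvDist f m) ∧
    (pvGenF m f).getLast? = some (List.replicate m.toNat 1) := by
  intro M
  induction M using Nat.strong_induction_on with
  | _ M ihM =>
  intro F
  induction F with
  | zero =>
    intro m f hm hf hf1 hfm
    exact absurd hf (by omega)
  | succ F ihF =>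
    intro m f hm hf hf1 hfm
    have hm1 : 1 ≤ m := le_trans hf1 hfm
    rw [pvGenF_eq m f (by omega)]
    by_cases hmf : m - f ≤ 0
    · -- f = m : the block is [[f]]
      have hfe : f = m := by omega
      rw [pvGen_eq_nil _ _ hmf]
      have hdist : pvDist f m = [f] := by
        rw [pvDist_eq f m (by omega) (by omega), if_neg (by omega), hfe]
      by_cases hf2 : f ≤ 1
      · -- f = m = 1 : the whole list is [[1]]
        have : f = 1 := by omega
        subst this
        rw [show (1:Int) - 1 = 0 from by norm_num, pvGenF_eq_nil m 0 (Or.inr (by omega))]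
        refine ⟨by simp, by simp [hdist], ?_⟩
        simp only [List.map_cons, List.map_nil, List.append_nil]
        rw [← hfe]
        simp
      · -- f = m ≥ 2
        obtain ⟨chT, hdT, lsT⟩ := ihF m (f - 1) hm (by omega) (by omega) (by omega)
        have hTnil : pvGenF m (f - 1) ≠ [] := by
          intro h; rw [h] at hdT; simp at hdT
        refine ⟨?_, ?_, ?_⟩
        · rw [List.isChain_append]
          refine ⟨by simp, chT, ?_⟩
          intro x hx y hy
          rw [hdT] at hy
          simp only [Option.mem_def, Option.some_inj] at hy
          simp at hx
          subst hx; subst hy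
          have := pvSucc_block f m (by omega) hfm
          rw [show (m - f).toNat = 0 from by omega] at this
          simpa using this
        · rw [List.head?_append_of_ne_nil _ (by simp)]
          simp [hdist]
        · rw [List.getLast?_append_of_ne_nil _ hTnil, lsT]
    · -- f < m : the block is (f :: ·) mapped over gen (m-f) f
      have hmf1 : 1 ≤ m - f := by omega
      rw [pvGen_eq _ _ (by omega)]
      have hminpos : 1 ≤ min (m - f) f := le_min (by omega) (by omega)
      obtain ⟨chS, hdS, lsS⟩ := ihM (m.toNat - 1) (by omega) ((min (m - f) f).toNat)
        (m - f) (min (m - f) f) (by omega) le_rfl hminpos (min_le_left _ _)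
      rw [pvDist_min _ _ (by omega) hmf1] at hdS
      have hSnil : pvGenF (m - f) (min (m - f) f) ≠ [] := by
        intro h; rw [h] at hdS; simp at hdS
      have hBnil : (pvGenF (m - f) (min (m - f) f)).map (f :: ·) ≠ [] := by
        simpa using hSnil
      have chB : List.IsChain (fun a b => pvSucc a = some b)
          ((pvGenF (m - f) (min (m - f) f)).map (f :: ·)) := by
        rw [List.isChain_map]
        exact chS.imp (fun a b h => pvSucc_lift f a b h)
      have hdB : ((pvGenF (m - f) (min (m - f) f)).map (f :: ·)).head?
          = some (pvDist f m) := by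
        rw [List.head?_map, hdS]
        simp only [Option.map_some, Option.some_inj]
        rw [pvDist_eq f m (by omega) (by omega), if_pos (by omega)]
      have lsB : ((pvGenF (m - f) (min (m - f) f)).map (f :: ·)).getLast?
          = some (f :: List.replicate (m - f).toNat 1) := by
        rw [List.getLast?_map, lsS]
        rfl
      by_cases hf2 : f ≤ 1
      · -- f = 1 : no further blocks
        have hfe : f = 1 := by omega
        rw [hfe, show (1:Int) - 1 = 0 from by norm_num,
          pvGenF_eq_nil m 0 (Or.inr (by omega)), List.append_nil]
        rw [hfe] at chB hdB lsB
        refine ⟨chB, hdB, ?_⟩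
        rw [lsB]
        congr 1
        have : m.toNat = (m - 1).toNat + 1 := by omega
        rw [this, List.replicate_succ]
      · -- 2 ≤ f < m
        obtain ⟨chT, hdT, lsT⟩ := ihF m (f - 1) hm (by omega) (by omega) (by omega)
        have hTnil : pvGenF m (f - 1) ≠ [] := by
          intro h; rw [h] at hdT; simp at hdT
        refine ⟨?_, ?_, ?_⟩
        · rw [List.isChain_append]
          refine ⟨chB, chT, ?_⟩
          intro x hx y hy
          rw [lsB] at hx
          rw [hdT] at hy
          simp only [Option.mem_def, Option.some_inj] at hx hy
          subst hx; subst hy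
          exact pvSucc_block f m (by omega) hfm
        · rw [List.head?_append_of_ne_nil _ hBnil, hdB]
        · rw [List.getLast?_append_of_ne_nil _ hTnil, lsT]

lemma pvGenF_len : ∀ (M F : Nat) (m f : Int), m.toNat ≤ M → f.toNat ≤ F → 1 ≤ m → 0 ≤ f → f ≤ m →
    (pvGenF m f).length + 2 ^ (m - f).toNat ≤ 2 ^ m.toNat := by
  intro M
  induction M using Nat.strong_induction_on with
  | _ M ihM =>
  intro F
  induction F with
  | zero =>
    intro m f hm hf hm1 hf0 hfm
    have : f = 0 := by omega
    subst this
    rw [pvGenF_eq_nil m 0 (Or.inr le_rfl)]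
    simp
  | succ F ihF =>
    intro m f hm hf hm1 hf0 hfm
    by_cases hfz : f ≤ 0
    · have : f = 0 := by omega
      subst this
      rw [pvGenF_eq_nil m 0 (Or.inr le_rfl)]
      simp
    · rw [pvGenF_eq m f (by omega)]
      have bound1 : (pvGen (m - f) f).length ≤ 2 ^ (m - f).toNat := by
        by_cases hmf : m - f ≤ 0
        · rw [pvGen_eq_nil _ _ hmf]
          have : (m - f).toNat = 0 := by omega
          simp [this]
        · rw [pvGen_eq _ _ hmf]
          have hmin0 : 0 ≤ min (m - f) f := le_min (by omega) (by omega)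
          have := ihM (m.toNat - 1) (by omega) ((min (m - f) f).toNat) (m - f)
            (min (m - f) f) (by omega) le_rfl (by omega) hmin0 (min_le_left _ _)
          have hp : 0 < 2 ^ ((m - f) - min (m - f) f).toNat := Nat.two_pow_pos _
          omega
      have bound2 := ihF m (f - 1) hm (by omega) hm1 (by omega) (by omega)
      have he : (m - (f - 1)).toNat = (m - f).toNat + 1 := by omega
      rw [he, pow_succ] at bound2
      simp only [List.length_append, List.length_map]
      omega

lemma pvGen_len (n : Int) (hn : 1 ≤ n) : (pvGen n n).length ≤ 2 ^ n.toNat := by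
  rw [pvGen_eq _ _ (by omega), min_self]
  have := pvGenF_len n.toNat n.toNat n n le_rfl le_rfl hn (by omega) le_rfl
  have hp : 0 < 2 ^ ((n : Int) - n).toNat := Nat.two_pow_pos _
  omega

lemma pvSucc_ones (m : Nat) : pvSucc (List.replicate m 1) = none := by
  unfold pvSucc
  have h1 : (List.replicate m (1 : Int)).reverse.dropWhile (· == 1) = [] := by
    rw [List.reverse_replicate]
    have := pvDropWhile_ones m ([] : List Int)
    simpa using this
  rw [h1]

lemma pvChainRun_eq : ∀ (L : List (List Int)) (fu : Nat) (q : List Int),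
    List.IsChain (fun a b => pvSucc a = some b) L →
    (∀ x ∈ L.getLast?, pvSucc x = none) →
    L.head? = some q → L.length ≤ fu →
    pvChainRun fu q = L := by
  intro L
  induction L with
  | nil => intro fu q _ _ hh _; simp at hh
  | cons p L' ih =>
    intro fu q hch hlast hh hfu
    simp only [List.head?_cons, Option.some_inj] at hh
    subst hh
    obtain ⟨fu', rfl⟩ : ∃ fu', fu = fu' + 1 := by
      cases fu with
      | zero => simp at hfu
      | succ k => exact ⟨k, rfl⟩
    rw [pvChainRun]
    rcases L' with _ | ⟨p2, L''⟩
    · have hnone : pvSucc p = none := hlast p (by simp)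
      rw [hnone]
    · have hch' := List.isChain_cons.mp hch
      have hsucc : pvSucc p = some p2 := hch'.1 p2 (by simp)
      rw [hsucc]
      congr 1
      apply ih
      · exact hch'.2
      · intro x hx
        exact hlast x (by simpa [List.getLast?_cons_cons] using hx)
      · simp
      · simp at hfu ⊢
        omega

-- ===== coefficient equality on non-increasing lists =====

lemma pvRun_spec (a : Int) : ∀ (l : List Int) (b : Int),
    pvRun a b l = (b + ((l.takeWhile (· == a)).length : Int), l.dropWhile (· == a)) := by
  intro l
  induction l with
  | nil => intro b; simp [pvRun]
  | cons x xs ih =>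
    intro b
    by_cases hx : (x == a) = true
    · rw [pvRun, if_pos hx, ih (b + 1)]
      simp only [List.takeWhile_cons, List.dropWhile_cons, hx, if_true,
        List.length_cons, Prod.mk.injEq]
      refine ⟨by push_cast; ring, trivial⟩
    · rw [pvRun, if_neg hx]
      simp only [List.takeWhile_cons, List.dropWhile_cons, hx]
      simp

lemma pvDropWhile_head_ne (p : Int → Bool) : ∀ (l : List Int) (x : Int) (t' : List Int),
    l.dropWhile p = x :: t' → p x = false := by
  intro l
  induction l with
  | nil => intro x t' h; simp at h
  | cons y ys ih =>
    intro x t' h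
    rw [List.dropWhile_cons] at h
    by_cases hy : p y = true
    · rw [if_pos hy] at h
      exact ih x t' h
    · rw [if_neg hy] at h
      injection h with h1 h2
      subst h1
      simpa using hy

lemma pvOfList_replicate (a : Int) : ∀ (k : Nat), 1 ≤ k →
    PySem.Set.ofList (List.replicate k a) = [a] := by
  intro k
  induction k with
  | zero => omega
  | succ k ih =>
    intro _
    rw [List.replicate_succ, PySem.Set.ofList_cons]
    cases hk0 : k with
    | zero => simp [PySem.Set.discard]
    | succ k' =>
      rw [hk0] at ih
      rw [ih (by omega)]
      simp [PySem.Set.discard]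

lemma pvCoeffFold (n : Int) (t : List Int) : ∀ (N : Nat) (c : List Int), c.length ≤ N →
    c.Pairwise (fun a b => b ≤ a) → ∀ cc : Int,
    ((PySem.Set.ofList c).map (fun k => (k, (c.count k : Int)))).foldl
        (fun cc ab => PySem.Int.floordiv cc (ab.1 ^ ab.2.toNat * pvFactorial ab.2 t)) cc
      = pvCoeffLoop t cc c := by
  intro N
  induction N with
  | zero =>
    intro c hc _ cc
    have : c = [] := List.length_eq_zero_iff.mp (by omega)
    subst this
    simp [pvCoeffLoop]
  | succ N ih =>
    intro c hc hpw cc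
    cases c with
    | nil => simp [pvCoeffLoop]
    | cons a xs =>
      set k := ((a :: xs).takeWhile (· == a)).length with hk_def
      set r := (a :: xs).dropWhile (· == a) with hr_def
      have hk1 : 1 ≤ k := by
        rw [hk_def]
        simp [List.takeWhile_cons]
      have hsplitc : (a :: xs) = List.replicate k a ++ r := by
        have h2 : (a :: xs).takeWhile (· == a) = List.replicate k a := by
          rw [hk_def]
          apply List.eq_replicate_of_mem
          intro b hb
          have := List.mem_takeWhile_imp hb
          simpa using this
        conv_lhs => rw [← List.takeWhile_append_dropWhile (p := (· == a)) (l := a :: xs)]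
        rw [h2, hr_def]
      have hpwr : r.Pairwise (fun a b => b ≤ a) :=
        hpw.sublist (hr_def ▸ List.dropWhile_sublist _)
      have hle_a : ∀ y ∈ (a :: xs), y ≤ a := by
        intro y hy
        rcases List.mem_cons.mp hy with rfl | hy
        · exact le_rfl
        · exact (List.pairwise_cons.mp hpw).1 y hy
      have har : a ∉ r := by
        intro hmem
        cases hr0 : r with
        | nil => rw [hr0] at hmem; simp at hmem
        | cons h0 r' =>
          have hh0 : ¬ ((h0 == a) = true) := by
            have hdw : (a :: xs).dropWhile (· == a) = h0 :: r' := by rw [← hr_def, hr0]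
            have := pvDropWhile_head_ne (· == a) (a :: xs) h0 r' hdw
            simp [this]
          have hh0a : h0 ≠ a := by simpa using hh0
          have hh0mem : h0 ∈ (a :: xs) := (hr_def ▸ List.dropWhile_sublist _).mem (by rw [hr0]; simp)
          have hh0le : h0 ≤ a := hle_a h0 hh0mem
          have hh0lt : h0 < a := lt_of_le_of_ne hh0le hh0a
          rw [hr0] at hmem hpwr
          rcases List.mem_cons.mp hmem with rfl | hmem'
          · exact absurd rfl hh0a
          · have := (List.pairwise_cons.mp hpwr).1 a hmem'
            omega
      have hcount_a : (a :: xs).count a = k := by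
        conv_lhs => rw [hsplitc]
        rw [List.count_append, List.count_replicate]
        simp [List.count_eq_zero.mpr har]
      have hcount_y : ∀ y ∈ PySem.Set.ofList r, (a :: xs).count y = r.count y := by
        intro y hy
        have hyr : y ∈ r := (PySem.Set.mem_ofList r y).mp hy
        have hyne : y ≠ a := fun h => har (h ▸ hyr)
        conv_lhs => rw [hsplitc]
        rw [List.count_append, List.count_replicate, if_neg (by simpa using (Ne.symm hyne))]
        simp
      have hof : PySem.Set.ofList (a :: xs) = a :: PySem.Set.ofList r := by
        conv_lhs => rw [hsplitc]
        rw [PySem.Set.ofList_append, pvOfList_replicate a k hk1,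
          PySem.Set.update_eq_append_filter]
        rw [List.filter_eq_self.mpr ?_]
        · rfl
        · intro y hy
          have hyr : y ∈ r := (PySem.Set.mem_ofList r y).mp hy
          have hyne : y ≠ a := fun h => har (h ▸ hyr)
          simpa using hyne
      have hrlen : r.length ≤ N := by
        have := congrArg List.length hsplitc
        simp only [List.length_cons, List.length_append, List.length_replicate] at this
        simp only [List.length_cons] at hc
        omega
      rw [hof]
      simp only [List.map_cons, List.foldl_cons, hcount_a]
      have hmap : (PySem.Set.ofList r).map (fun y => (y, ((a :: xs).count y : Int)))
          = (PySem.Set.ofList r).map (fun y => (y, (r.count y : Int))) :=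
        List.map_congr_left (fun y hy => by rw [hcount_y y hy])
      rw [hmap, ih r hrlen hpwr]
      have hrun : pvRun a 0 (a :: xs) = ((k : Int), r) := by
        rw [pvRun_spec a (a :: xs) 0]
        rw [← hk_def, ← hr_def]
        simp
      conv_rhs => rw [pvCoeffLoop]
      rw [hrun]
      simp [pvFactorial]

lemma pvCoeff_eq (n : Int) (t : List Int) :
    ∀ (c : List Int), c.Pairwise (fun a b => b ≤ a) →
    pvCoefficientFactor c n t = pvCoefficientFactorB c n t := by
  intro c hpw
  unfold pvCoefficientFactor pvCoefficientFactorB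
  rw [PySem.Dict.items_counter]
  exact pvCoeffFold n t c.length c le_rfl hpw _

-- ===== VERDICT (by name: the statement is the Claim_ definition above) =====
theorem partitionsAndCycleCount_spec : Claim_equal_partitionsAndCycleCount := by
  intro n t _ hpre
  obtain ⟨hn1, -, -⟩ := hpre
  unfold Spec_partitionsAndCycleCount
  unfold partitionsAndCycleCount partitionsAndCycleCount_alt
  have hinit : (List.replicate n.toNat (0:Int)).set 0 n
      = [n] ++ List.replicate (n.toNat - 1) 0 := by
    conv_lhs => rw [show n.toNat = (n.toNat - 1) + 1 from by omega]
    rw [List.replicate_succ, List.set_cons_zero]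
    rfl
  rw [hinit]
  have hvalid : pvValid n [n] (List.replicate (n.toNat - 1) 0) := by
    refine ⟨by simp, ?_, by simp, by simp; omega⟩
    intro x hx
    simp only [List.mem_singleton] at hx
    omega
  have hmain := pvMainLoop_spec n t (2 ^ n.toNat) [n] (List.replicate (n.toNat - 1) 0) [] hvalid
  rw [show ((([n] : List Int).length : Int) - 1) = 0 from by simp] at hmain
  rw [hmain]
  obtain ⟨hch, hhd, hls⟩ := pvGenF_chain n.toNat n.toNat n n le_rfl le_rfl hn1 le_rfl
  have hgeq : pvGen n n = pvGenF n n := by rw [pvGen_eq _ _ (by omega), min_self]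
  have hdnn : pvDist n n = [n] := by rw [pvDist_eq n n hn1 hn1, if_neg (by omega)]
  have hrun : pvChainRun (2 ^ n.toNat) [n] = pvGen n n := by
    apply pvChainRun_eq
    · rw [hgeq]; exact hch
    · intro x hx
      rw [hgeq, hls] at hx
      simp only [Option.mem_def, Option.some_inj] at hx
      subst hx
      exact pvSucc_ones n.toNat
    · rw [hgeq, hhd, hdnn]
    · exact pvGen_len n hn1
  rw [hrun]
  simp only [List.nil_append]
  apply List.map_congr_left
  intro q hq
  rw [pvCoeff_eq n t q (pvGen_props n n (by omega) q hq).2.2]
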